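-- pv_equiv track=rewrite | github.com/volcengine/verl | atropos/environments/intern_bootcamp/internbootcamp_lib/internbootcamp/bootcamp/exorinverse/exorinverse.py | compute_min_inversion_xor
-- ===== SOURCE A (Python) =====
-- def compute_min_inversion_xor(a):
--     n = len(a)
--     data = []
--     for num in a:
--         bits = []
--         for i in range(30):
--             if num & (1 << i):
--                 bits.append('1')
--             else:
--                 bits.append('0')
--         data.append(bits[::-1])  # Reverse to store MSB first
--
--     run = [list(range(n))]
--     ans = 0
--     b_val = 0
--
--     for i in range(30):  # Now using correct bit order
--         sum0 = 0
--         sum1 = 0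
--         split = []
--         for group in run:
--             zero = []
--             one = []
--             cnt0 = 0
--             cnt1 = 0
--             for k in group:
--                 if data[k][i] == '1':
--                     sum0 += cnt0
--                     cnt1 += 1
--                     one.append(k)
--                 else:
--                     sum1 += cnt1
--                     cnt0 += 1
--                     zero.append(k)
--             if zero:
--                 split.append(zero)
--             if one:
--                 split.append(one)
--         if sum1 > sum0:
--             ans += (1 << (29 - i))  # Adjust for bit significance
--             b_val += sum0
--         else:
--             b_val += sum1
--         run = split
--
--     return b_val, ans
-- ===== SOURCE B (Python) =====
-- def compute_min_inversion_xor(a):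
--     # Depth-first recursion over the binary trie of the values, accumulating
--     # per-bit crossing costs into global arrays, instead of A's
--     # level-synchronous partition refinement.
--     cost0 = [0] * 30
--     cost1 = [0] * 30
--
--     def recurse(vals, bit):
--         if bit < 0 or len(vals) <= 1:
--             return
--         zeros = []
--         ones = []
--         c0 = 0
--         c1 = 0
--         add0 = 0
--         add1 = 0
--         for v in vals:
--             if v & (1 << bit):
--                 add0 += c0
--                 c1 += 1
--                 ones.append(v)
--             else:
--                 add1 += c1
--                 c0 += 1
--                 zeros.append(v)
--         cost0[bit] += add0
--         cost1[bit] += add1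
--         recurse(zeros, bit - 1)
--         recurse(ones, bit - 1)
--
--     recurse(list(a), 29)
--
--     b_val = 0
--     ans = 0
--     for i in range(30):
--         bit = 29 - i
--         if cost1[bit] > cost0[bit]:
--             ans += 1 << bit
--             b_val += cost0[bit]
--         else:
--             b_val += cost1[bit]
--     return b_val, ans
-- ===== Notes on version B (the rewrite author's own statement) =====
-- stated objective: alternative
-- what changed: A sweeps the 30 bit levels iteratively, refining a flat list of index groups level-by-level (BFS over the implicit trie) against a precomputed matrix of 30-character bit strings; B instead recurses depth-first over the binary trie of the values themselves, splitting each node into zero/one children while accumulating per-bit crossing costs into two global arrays and making the greedy per-bit choice afterwards; a measured constant-factor speedup comes from testing bits with integer arithmetic on the values instead of A's per-number string rows and index-list indirection.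
import Mathlib
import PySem

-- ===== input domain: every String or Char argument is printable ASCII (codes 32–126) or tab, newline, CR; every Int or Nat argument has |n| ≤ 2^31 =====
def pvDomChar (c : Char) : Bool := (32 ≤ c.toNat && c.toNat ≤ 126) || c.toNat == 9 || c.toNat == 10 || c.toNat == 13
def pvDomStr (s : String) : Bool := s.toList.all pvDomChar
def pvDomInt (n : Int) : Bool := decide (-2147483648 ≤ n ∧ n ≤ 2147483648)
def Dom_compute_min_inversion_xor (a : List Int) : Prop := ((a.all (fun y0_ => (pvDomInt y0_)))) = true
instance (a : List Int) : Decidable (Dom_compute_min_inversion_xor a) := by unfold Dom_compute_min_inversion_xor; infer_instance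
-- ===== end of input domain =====

-- B recurses depth-first over the binary trie of the values with global per-bit cost accumulators, instead of A's iterative level-by-level partition refinement over precomputed bit-string rows; measured faster in a timing run (constant factor: integer bit tests instead of string rows).

-- ===== PORT A =====
-- A's per-number 30-bit row, MSB first (bits appended LSB-first, then reversed, as in the Python)
def aBitRow (num : Int) : List Char :=
  let bits : List Char := (List.range 30).foldl
    (fun (bits : List Char) (i : Nat) => bits ++ [if PySem.Int.band num ((1:Int) <<< i) ≠ 0 then '1' else '0']) []
  bits.reverse

-- body of A's inner loop over `group`; state (zero, one, cnt0, cnt1, sum0, sum1)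
def aInnerStep (data : List (List Char)) (i : Nat)
    (t : List Nat × List Nat × Int × Int × Int × Int) (k : Nat) :
    List Nat × List Nat × Int × Int × Int × Int :=
  match t with
  | (zero, one, cnt0, cnt1, s0, s1) =>
    if (data.getD k []).getD i '0' = '1' then
      (zero, one ++ [k], cnt0, cnt1 + 1, s0 + cnt0, s1)
    else
      (zero ++ [k], one, cnt0 + 1, cnt1, s0, s1 + cnt1)

-- body of A's loop over `run`; state (sum0, sum1, split)
def aGroupStep (data : List (List Char)) (i : Nat)
    (acc : Int × Int × List (List Nat)) (g : List Nat) : Int × Int × List (List Nat) :=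
  match acc with
  | (sum0, sum1, split) =>
    match g.foldl (aInnerStep data i) ([], [], 0, 0, sum0, sum1) with
    | (zero, one, _, _, s0, s1) =>
      let split := if zero ≠ [] then split ++ [zero] else split
      let split := if one ≠ [] then split ++ [one] else split
      (s0, s1, split)

-- body of A's loop over bits; state (run, ans, b_val)
def aBitStep (data : List (List Char)) (st : List (List Nat) × Int × Int) (i : Nat) :
    List (List Nat) × Int × Int :=
  match st with
  | (run, ans, b_val) =>
    match run.foldl (aGroupStep data i) (0, 0, []) with
    | (sum0, sum1, split) =>
      if sum1 > sum0 then (split, ans + (1:Int) <<< (29 - i), b_val + sum0)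
      else (split, ans, b_val + sum1)

def compute_min_inversion_xor (a : List Int) : Int × Int :=
  let n := a.length
  let data := a.map aBitRow
  match (List.range 30).foldl (aBitStep data) ([List.range n], 0, 0) with
  | (_, ans, b_val) => (b_val, ans)

-- ===== PORT B =====
-- body of B's scan over `vals` at bit `bit`; state (zeros, ones, c0, c1, add0, add1)
def bScanStep (bit : Nat) (t : List Int × List Int × Int × Int × Int × Int) (v : Int) :
    List Int × List Int × Int × Int × Int × Int :=
  match t with
  | (zeros, ones, c0, c1, add0, add1) =>
    if PySem.Int.band v ((1:Int) <<< bit) ≠ 0 then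
      (zeros, ones ++ [v], c0, c1 + 1, add0 + c0, add1)
    else
      (zeros ++ [v], ones, c0 + 1, c1, add0, add1 + c1)

-- B's recursion over the trie; Python's `bit` is `fuel - 1`, `bit < 0` is `fuel = 0`;
-- the global arrays cost0/cost1 are threaded through as state
def bRec : Nat → List Int → List Int × List Int → List Int × List Int
  | 0, _, costs => costs
  | fuel + 1, vals, (cost0, cost1) =>
    if vals.length ≤ 1 then (cost0, cost1)
    else
      let bit := fuel
      match vals.foldl (bScanStep bit) ([], [], 0, 0, 0, 0) with
      | (zeros, ones, _, _, add0, add1) =>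
        let cost0 := cost0.set bit (cost0.getD bit 0 + add0)
        let cost1 := cost1.set bit (cost1.getD bit 0 + add1)
        bRec fuel ones (bRec fuel zeros (cost0, cost1))

-- body of B's final loop; state (b_val, ans)
def bFinStep (cost0 cost1 : List Int) (st : Int × Int) (i : Nat) : Int × Int :=
  match st with
  | (b_val, ans) =>
    let bit := 29 - i
    if cost1.getD bit 0 > cost0.getD bit 0 then (b_val + cost0.getD bit 0, ans + (1:Int) <<< bit)
    else (b_val + cost1.getD bit 0, ans)

def compute_min_inversion_xor_alt (a : List Int) : Int × Int :=
  match bRec 30 a (List.replicate 30 0, List.replicate 30 0) with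
  | (cost0, cost1) => (List.range 30).foldl (bFinStep cost0 cost1) (0, 0)

-- ===== PRECONDITION & SPEC =====
def Spec_compute_min_inversion_xor (a : List Int) (out : Int × Int) : Prop := out = compute_min_inversion_xor_alt a
instance (a : List Int) (out : Int × Int) : Decidable (Spec_compute_min_inversion_xor a out) := by unfold Spec_compute_min_inversion_xor; infer_instance

-- ===== CLAIM (what is proved, stated in full; the proofs are below) =====
def Claim_equal_compute_min_inversion_xor : Prop := ∀ (a : List Int), Dom_compute_min_inversion_xor a → Spec_compute_min_inversion_xor a (compute_min_inversion_xor a)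

-- ===== LEMMAS AND PROOFS =====

-- pair counter: pairs (x before y in l) with P x and Q y
def pc {α : Type} (P Q : α → Bool) : List α → Nat
  | [] => 0
  | x :: t => (if P x then t.countP Q else 0) + pc P Q t

-- pair counter restricted to pairs related by R
def pcR {α : Type} (R : α → α → Bool) (P Q : α → Bool) : List α → Nat
  | [] => 0
  | x :: t => (if P x then t.countP (fun y => R x y && Q y) else 0) + pcR R P Q t

-- A's bit test, as a Bool, directly on `data`
def chA (data : List (List Char)) (k : Nat) (i : Nat) : Bool :=
  decide ((data.getD k []).getD i '0' = '1')

-- "same top-i bits" relation on indices, via A's bit test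
def keyA (data : List (List Char)) (i : Nat) (k1 k2 : Nat) : Bool :=
  (List.range i).all (fun j => chA data k1 j == chA data k2 j)

-- canonical per-bit sums and the canonical choice fold (state (ans, b_val))
def s0can (data : List (List Char)) (n : Nat) (i : Nat) : Int :=
  (pcR (keyA data i) (fun k => !chA data k i) (fun k => chA data k i) (List.range n) : Nat)
def s1can (data : List (List Char)) (n : Nat) (i : Nat) : Int :=
  (pcR (keyA data i) (fun k => chA data k i) (fun k => !chA data k i) (List.range n) : Nat)

def cstep (data : List (List Char)) (n : Nat) (st : Int × Int) (i : Nat) : Int × Int :=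
  if s1can data n i > s0can data n i then (st.1 + (1:Int) <<< (29 - i), st.2 + s0can data n i)
  else (st.1, st.2 + s1can data n i)

-- the invariant carried by A's `run`
def InvA (data : List (List Char)) (n : Nat) (i : Nat) (run : List (List Nat)) : Prop :=
  ∀ P Q : Nat → Bool, ((run.map (pc P Q)).sum) = pcR (keyA data i) P Q (List.range n)

-- B's bit test (LSB-numbered) and the "bits lo..hi-1 equal" relation on values
def btst (v : Int) (j : Nat) : Bool := decide (PySem.Int.band v ((1:Int) <<< j) ≠ 0)
def relB (lo hi : Nat) (v w : Int) : Bool :=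
  (List.range' lo (hi - lo)).all (fun j => btst v j == btst w j)

-- what B's recursion with `fuel` adds at array index `bit` for a node list `vals`
def contrib0 (fuel bit : Nat) (vals : List Int) : Int :=
  if bit < fuel then
    (pcR (relB (bit + 1) fuel) (fun v => !btst v bit) (fun v => btst v bit) vals : Nat)
  else 0
def contrib1 (fuel bit : Nat) (vals : List Int) : Int :=
  if bit < fuel then
    (pcR (relB (bit + 1) fuel) (fun v => btst v bit) (fun v => !btst v bit) vals : Nat)
  else 0

-- ---- generic pc/pcR lemmas ----

lemma pc_filter {α : Type} (P Q r : α → Bool) (l : List α) :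
    pc P Q (l.filter r) = pc (fun x => r x && P x) (fun x => r x && Q x) l := by
  induction l with
  | nil => simp [pc]
  | cons x t ih =>
    cases hx : r x with
    | true =>
      simp only [pc, List.filter_cons, hx, if_true, Bool.true_and, ih]
      congr 1
      rcases hP : P x with _ | _
      · simp
      · simp only [if_true]
        rw [List.countP_filter]
        exact List.countP_congr (fun a _ => by cases Q a <;> cases r a <;> simp)
    | false => simp [pc, hx, ih]

lemma pcR_filter {α : Type} (R : α → α → Bool) (P Q r : α → Bool) (l : List α) :
    pcR R P Q (l.filter r) = pcR R (fun x => r x && P x) (fun x => r x && Q x) l := by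
  induction l with
  | nil => simp [pcR]
  | cons x t ih =>
    cases hx : r x with
    | true =>
      simp only [pcR, List.filter_cons, hx, if_true, Bool.true_and, ih]
      congr 1
      rcases hP : P x with _ | _
      · simp
      · simp only [if_true]
        rw [List.countP_filter]
        exact List.countP_congr (fun a _ => by cases R x a <;> cases Q a <;> cases r a <;> simp)
    | false => simp [pcR, hx, ih]

lemma pcR_split {α : Type} (R R' : α → α → Bool) (p P Q : α → Bool)
    (h : ∀ x y, R' x y = (R x y && (p x == p y))) (l : List α) :
    pcR R' P Q l =
      pcR R (fun x => p x && P x) (fun y => p y && Q y) l +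
      pcR R (fun x => !p x && P x) (fun y => !p y && Q y) l := by
  induction l with
  | nil => simp [pcR]
  | cons x t ih =>
    simp only [pcR, ih]
    cases hp : p x with
    | true =>
      have h1 : ∀ y, (R' x y && Q y) = (R x y && (p y && Q y)) := by
        intro y; rw [h, hp]; cases R x y <;> cases p y <;> cases Q y <;> rfl
      rw [List.countP_congr (fun y _ => by rw [h1 y])]
      cases P x <;> simp <;> omega
    | false =>
      have h1 : ∀ y, (R' x y && Q y) = (R x y && (!p y && Q y)) := by
        intro y; rw [h, hp]; cases R x y <;> cases p y <;> cases Q y <;> rfl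
      rw [List.countP_congr (fun y _ => by rw [h1 y])]
      cases P x <;> simp <;> omega

lemma pcR_congr_mem {α : Type} (R R' : α → α → Bool) (P P' Q Q' : α → Bool) (l : List α)
    (hR : ∀ x ∈ l, ∀ y ∈ l, R x y = R' x y) (hP : ∀ x ∈ l, P x = P' x)
    (hQ : ∀ x ∈ l, Q x = Q' x) :
    pcR R P Q l = pcR R' P' Q' l := by
  induction l with
  | nil => simp [pcR]
  | cons x t ih =>
    simp only [pcR]
    rw [hP x List.mem_cons_self,
      List.countP_congr (fun y hy => by
        rw [hR x List.mem_cons_self y (List.mem_cons_of_mem _ hy),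
          hQ y (List.mem_cons_of_mem _ hy)]),
      ih (fun x hx y hy => hR x (List.mem_cons_of_mem _ hx) y (List.mem_cons_of_mem _ hy))
        (fun x hx => hP x (List.mem_cons_of_mem _ hx))
        (fun x hx => hQ x (List.mem_cons_of_mem _ hx))]

lemma pcR_true {α : Type} (P Q : α → Bool) (l : List α) :
    pcR (fun _ _ => true) P Q l = pc P Q l := by
  induction l with
  | nil => rfl
  | cons x t ih => simp [pcR, pc, ih]

lemma pcR_map {α β : Type} (R : β → β → Bool) (P Q : β → Bool) (f : α → β) (l : List α) :
    pcR R P Q (l.map f) =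
      pcR (fun x y => R (f x) (f y)) (fun x => P (f x)) (fun x => Q (f x)) l := by
  induction l with
  | nil => rfl
  | cons x t ih =>
    simp only [List.map_cons, pcR, List.countP_map, ih]
    rfl

lemma pcR_short {α : Type} (R : α → α → Bool) (P Q : α → Bool) (l : List α)
    (h : l.length ≤ 1) : pcR R P Q l = 0 := by
  match l, h with
  | [], _ => rfl
  | [x], _ => simp [pcR]

lemma pv_sum_map_add {α : Type} (l : List α) (f g : α → Nat) :
    (l.map (fun x => f x + g x)).sum = (l.map f).sum + (l.map g).sum := by
  induction l with
  | nil => rfl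
  | cons x t ih => simp only [List.map_cons, List.sum_cons, ih]; omega

-- ---- A-side lemmas ----

lemma aScan (data : List (List Char)) (i : Nat) (g zero one : List Nat) (c0 c1 s0 s1 : Int) :
    g.foldl (aInnerStep data i) (zero, one, c0, c1, s0, s1) =
      (zero ++ g.filter (fun k => !chA data k i),
       one ++ g.filter (fun k => chA data k i),
       c0 + (g.countP (fun k => !chA data k i) : Nat),
       c1 + (g.countP (fun k => chA data k i) : Nat),
       s0 + c0 * (g.countP (fun k => chA data k i) : Nat) +
         (pc (fun k => !chA data k i) (fun k => chA data k i) g : Nat),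
       s1 + c1 * (g.countP (fun k => !chA data k i) : Nat) +
         (pc (fun k => chA data k i) (fun k => !chA data k i) g : Nat)) := by
  induction g generalizing zero one c0 c1 s0 s1 with
  | nil => simp [pc]
  | cons k t ih =>
    simp only [List.foldl_cons, aInnerStep]
    by_cases hk : (data.getD k []).getD i '0' = '1'
    · have hch : chA data k i = true := by unfold chA; exact decide_eq_true hk
      rw [if_pos hk, ih]
      simp only [List.filter_cons, List.countP_cons, pc, hch, Bool.not_true, Prod.mk.injEq]
      refine ⟨by simp, by simp, by push_cast; ring, by push_cast; ring, by push_cast; ring,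
        by push_cast; ring⟩
    · have hch : chA data k i = false := by unfold chA; exact decide_eq_false hk
      rw [if_neg hk, ih]
      simp only [List.filter_cons, List.countP_cons, pc, hch, Bool.not_false, Prod.mk.injEq]
      refine ⟨by simp, by simp, by push_cast; ring, by push_cast; ring, by push_cast; ring,
        by push_cast; ring⟩

def splitOf (data : List (List Char)) (i : Nat) (run : List (List Nat)) : List (List Nat) :=
  run.flatMap (fun g =>
    (if g.filter (fun k => !chA data k i) ≠ [] then [g.filter (fun k => !chA data k i)] else []) ++
    (if g.filter (fun k => chA data k i) ≠ [] then [g.filter (fun k => chA data k i)] else []))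

lemma aGroups (data : List (List Char)) (i : Nat) (run : List (List Nat))
    (s0 s1 : Int) (sp : List (List Nat)) :
    run.foldl (aGroupStep data i) (s0, s1, sp) =
      (s0 + ((run.map (pc (fun k => !chA data k i) (fun k => chA data k i))).sum : Nat),
       s1 + ((run.map (pc (fun k => chA data k i) (fun k => !chA data k i))).sum : Nat),
       sp ++ splitOf data i run) := by
  induction run generalizing s0 s1 sp with
  | nil => simp [splitOf]
  | cons g rest ih =>
    have happ : ∀ (sp : List (List Nat)) (z : List Nat),
        (if z ≠ [] then sp ++ [z] else sp) = sp ++ (if z ≠ [] then [z] else []) := by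
      intro sp z; split <;> simp
    simp only [List.foldl_cons, aGroupStep, aScan, List.nil_append, zero_mul, add_zero, ih, happ]
    simp only [splitOf, List.flatMap_cons, List.map_cons, List.sum_cons, Prod.mk.injEq]
    refine ⟨by push_cast; ring, by push_cast; ring, by simp [List.append_assoc]⟩

lemma keyA_succ (data : List (List Char)) (i : Nat) (x y : Nat) :
    keyA data (i + 1) x y = (keyA data i x y && (chA data x i == chA data y i)) := by
  simp [keyA, List.range_succ, List.all_append]

lemma sum_splitOf (data : List (List Char)) (i : Nat) (P Q : Nat → Bool) (run : List (List Nat)) :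
    ((splitOf data i run).map (pc P Q)).sum =
      (run.map (fun g => pc P Q (g.filter (fun k => !chA data k i)) +
        pc P Q (g.filter (fun k => chA data k i)))).sum := by
  have splitOf_cons : ∀ (g : List Nat) (rest : List (List Nat)),
      splitOf data i (g :: rest) =
        ((if g.filter (fun k => !chA data k i) ≠ [] then [g.filter (fun k => !chA data k i)] else []) ++
         (if g.filter (fun k => chA data k i) ≠ [] then [g.filter (fun k => chA data k i)] else [])) ++
        splitOf data i rest := by
    intro g rest; simp [splitOf]
  induction run with
  | nil => rfl
  | cons g rest ih =>
    rw [splitOf_cons, List.map_append, List.sum_append, ih, List.map_cons, List.sum_cons]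
    congr 1
    by_cases h1 : g.filter (fun k => !chA data k i) = [] <;>
      by_cases h2 : g.filter (fun k => chA data k i) = [] <;>
      simp [h1, h2, pc]

lemma invA_step (data : List (List Char)) (n : Nat) (i : Nat) (run : List (List Nat))
    (h : InvA data n i run) : InvA data n (i + 1) (splitOf data i run) := by
  intro P Q
  rw [sum_splitOf]
  have hmap : (run.map (fun g => pc P Q (g.filter (fun k => !chA data k i)) +
        pc P Q (g.filter (fun k => chA data k i)))).sum =
      (run.map (fun g => pc (fun x => !chA data x i && P x) (fun x => !chA data x i && Q x) g)).sum +
      (run.map (fun g => pc (fun x => chA data x i && P x) (fun x => chA data x i && Q x) g)).sum := by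
    rw [← pv_sum_map_add]
    refine congrArg List.sum (List.map_congr_left ?_)
    intro g _
    rw [pc_filter, pc_filter]
  rw [hmap, h _ _, h _ _,
    pcR_split (keyA data i) (keyA data (i+1)) (fun k => chA data k i) P Q
      (fun x y => keyA_succ data i x y) (List.range n)]
  omega

lemma invA_zero (data : List (List Char)) (n : Nat) : InvA data n 0 [List.range n] := by
  intro P Q
  simp only [List.map_cons, List.map_nil, List.sum_cons, List.sum_nil, Nat.add_zero]
  rw [← pcR_true P Q (List.range n)]
  exact pcR_congr_mem _ _ _ _ _ _ _ (fun x _ y _ => by simp [keyA]) (fun _ _ => rfl)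
    (fun _ _ => rfl)

lemma aLoop (data : List (List Char)) (n : Nat) :
    ∀ (m i : Nat) (run : List (List Nat)) (ans b : Int), InvA data n i run →
      ((List.range' i m).foldl (aBitStep data) (run, ans, b)).2 =
        (List.range' i m).foldl (cstep data n) (ans, b) := by
  intro m
  induction m with
  | zero => intro i run ans b _; rfl
  | succ m ih =>
    intro i run ans b hInv
    rw [List.range'_succ, List.foldl_cons, List.foldl_cons]
    have e0 : ((run.map (pc (fun k => !chA data k i) (fun k => chA data k i))).sum : Int) =
        s0can data n i := by
      rw [hInv]; rfl
    have e1 : ((run.map (pc (fun k => chA data k i) (fun k => !chA data k i))).sum : Int) =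
        s1can data n i := by
      rw [hInv]; rfl
    have hstep : aBitStep data (run, ans, b) i =
        (splitOf data i run, cstep data n (ans, b) i) := by
      simp only [aBitStep, aGroups, zero_add, List.nil_append, cstep, e0, e1]
      split <;> rfl
    rw [hstep]
    exact ih (i+1) _ _ _ (invA_step data n i run hInv)

-- ---- B-side lemmas ----

lemma bScan (bit : Nat) (vals zeros ones : List Int) (c0 c1 add0 add1 : Int) :
    vals.foldl (bScanStep bit) (zeros, ones, c0, c1, add0, add1) =
      (zeros ++ vals.filter (fun v => !btst v bit),
       ones ++ vals.filter (fun v => btst v bit),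
       c0 + (vals.countP (fun v => !btst v bit) : Nat),
       c1 + (vals.countP (fun v => btst v bit) : Nat),
       add0 + c0 * (vals.countP (fun v => btst v bit) : Nat) +
         (pc (fun v => !btst v bit) (fun v => btst v bit) vals : Nat),
       add1 + c1 * (vals.countP (fun v => !btst v bit) : Nat) +
         (pc (fun v => btst v bit) (fun v => !btst v bit) vals : Nat)) := by
  induction vals generalizing zeros ones c0 c1 add0 add1 with
  | nil => simp [pc]
  | cons v t ih =>
    simp only [List.foldl_cons, bScanStep]
    by_cases hv : PySem.Int.band v ((1:Int) <<< bit) ≠ 0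
    · have hb : btst v bit = true := by unfold btst; exact decide_eq_true hv
      rw [if_pos hv, ih]
      simp only [List.filter_cons, List.countP_cons, pc, hb, Bool.not_true, Prod.mk.injEq]
      refine ⟨by simp, by simp, by push_cast; ring, by push_cast; ring, by push_cast; ring,
        by push_cast; ring⟩
    · have hb : btst v bit = false := by unfold btst; exact decide_eq_false hv
      rw [if_neg hv, ih]
      simp only [List.filter_cons, List.countP_cons, pc, hb, Bool.not_false, Prod.mk.injEq]
      refine ⟨by simp, by simp, by push_cast; ring, by push_cast; ring, by push_cast; ring,
        by push_cast; ring⟩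

lemma relB_self (lo : Nat) (v w : Int) : relB lo lo v w = true := by
  simp [relB]

lemma relB_succ (bit fuel : Nat) (h : bit < fuel) (v w : Int) :
    relB (bit + 1) (fuel + 1) v w = (relB (bit + 1) fuel v w && (btst v fuel == btst w fuel)) := by
  unfold relB
  have h1 : fuel + 1 - (bit + 1) = (fuel - (bit + 1)) + 1 := by omega
  have h2 : bit + 1 + (fuel - (bit + 1)) = fuel := by omega
  rw [h1, List.range'_1_concat, List.all_append, h2]
  simp

lemma contrib_split0 (fuel bit : Nat) (hb : bit < fuel) (vals : List Int) :
    contrib0 fuel bit (vals.filter (fun v => !btst v fuel)) +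
      contrib0 fuel bit (vals.filter (fun v => btst v fuel)) =
    contrib0 (fuel + 1) bit vals := by
  unfold contrib0
  rw [if_pos hb, if_pos hb, if_pos (by omega : bit < fuel + 1)]
  rw [pcR_filter, pcR_filter,
    pcR_split (relB (bit + 1) fuel) (relB (bit + 1) (fuel + 1)) (fun v => btst v fuel)
      (fun v => !btst v bit) (fun v => btst v bit) (relB_succ bit fuel hb) vals]
  push_cast
  ring

lemma contrib_split1 (fuel bit : Nat) (hb : bit < fuel) (vals : List Int) :
    contrib1 fuel bit (vals.filter (fun v => !btst v fuel)) +
      contrib1 fuel bit (vals.filter (fun v => btst v fuel)) =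
    contrib1 (fuel + 1) bit vals := by
  unfold contrib1
  rw [if_pos hb, if_pos hb, if_pos (by omega : bit < fuel + 1)]
  rw [pcR_filter, pcR_filter,
    pcR_split (relB (bit + 1) fuel) (relB (bit + 1) (fuel + 1)) (fun v => btst v fuel)
      (fun v => btst v bit) (fun v => !btst v bit) (relB_succ bit fuel hb) vals]
  push_cast
  ring

lemma contrib0_top (fuel : Nat) (vals : List Int) :
    contrib0 (fuel + 1) fuel vals =
      (pc (fun v => !btst v fuel) (fun v => btst v fuel) vals : Nat) := by
  unfold contrib0
  rw [if_pos (by omega : fuel < fuel + 1), ← pcR_true]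
  congr 1
  exact pcR_congr_mem _ _ _ _ _ _ _ (fun x _ y _ => relB_self (fuel + 1) x y)
    (fun _ _ => rfl) (fun _ _ => rfl)

lemma contrib1_top (fuel : Nat) (vals : List Int) :
    contrib1 (fuel + 1) fuel vals =
      (pc (fun v => btst v fuel) (fun v => !btst v fuel) vals : Nat) := by
  unfold contrib1
  rw [if_pos (by omega : fuel < fuel + 1), ← pcR_true]
  congr 1
  exact pcR_congr_mem _ _ _ _ _ _ _ (fun x _ y _ => relB_self (fuel + 1) x y)
    (fun _ _ => rfl) (fun _ _ => rfl)

lemma getD_set_ne (l : List Int) (i j : Nat) (x : Int) (h : i ≠ j) :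
    (l.set i x).getD j 0 = l.getD j 0 := by
  simp [List.getD, List.getElem?_set_ne h]

lemma getD_set_self (l : List Int) (i : Nat) (x : Int) (h : i < l.length) :
    (l.set i x).getD i 0 = x := by
  simp [List.getD, h]

-- the invariant of B's recursion: lengths are preserved and each array index
-- gains exactly the canonical per-bit cost of the node list
lemma bRec_spec : ∀ (fuel : Nat) (vals cost0 cost1 : List Int), fuel ≤ 30 →
    cost0.length = 30 → cost1.length = 30 →
    (bRec fuel vals (cost0, cost1)).1.length = 30 ∧
    (bRec fuel vals (cost0, cost1)).2.length = 30 ∧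
    ∀ bit : Nat,
      (bRec fuel vals (cost0, cost1)).1.getD bit 0 = cost0.getD bit 0 + contrib0 fuel bit vals ∧
      (bRec fuel vals (cost0, cost1)).2.getD bit 0 = cost1.getD bit 0 + contrib1 fuel bit vals := by
  intro fuel
  induction fuel with
  | zero =>
    intro vals cost0 cost1 _ hl0 hl1
    refine ⟨hl0, hl1, fun bit => ?_⟩
    simp [bRec, contrib0, contrib1]
  | succ fuel ih =>
    intro vals cost0 cost1 hf hl0 hl1
    by_cases hlen : vals.length ≤ 1
    · have hz : ∀ f b, contrib0 f b vals = 0 ∧ contrib1 f b vals = 0 := by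
        intro f b
        unfold contrib0 contrib1
        split <;> simp [pcR_short _ _ _ _ hlen]
      simp only [bRec, if_pos hlen]
      exact ⟨hl0, hl1, fun bit => by simp [(hz (fuel+1) bit).1, (hz (fuel+1) bit).2]⟩
    · have hstep : bRec (fuel + 1) vals (cost0, cost1) =
          bRec fuel (vals.filter (fun v => btst v fuel))
            (bRec fuel (vals.filter (fun v => !btst v fuel))
              (cost0.set fuel (cost0.getD fuel 0 +
                 (pc (fun v => !btst v fuel) (fun v => btst v fuel) vals : Nat)),
               cost1.set fuel (cost1.getD fuel 0 +
                 (pc (fun v => btst v fuel) (fun v => !btst v fuel) vals : Nat)))) := by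
        simp only [bRec, if_neg hlen, bScan, List.nil_append, zero_mul, add_zero, zero_add]
      set c0' := cost0.set fuel (cost0.getD fuel 0 +
        (pc (fun v => !btst v fuel) (fun v => btst v fuel) vals : Nat)) with hc0'
      set c1' := cost1.set fuel (cost1.getD fuel 0 +
        (pc (fun v => btst v fuel) (fun v => !btst v fuel) vals : Nat)) with hc1'
      have hlen0' : c0'.length = 30 := by rw [hc0']; simp [hl0]
      have hlen1' : c1'.length = 30 := by rw [hc1']; simp [hl1]
      obtain ⟨hz0, hz1, hzD⟩ := ih (vals.filter (fun v => !btst v fuel)) c0' c1'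
        (by omega) hlen0' hlen1'
      rcases hE : bRec fuel (vals.filter (fun v => !btst v fuel)) (c0', c1') with ⟨m0, m1⟩
      rw [hE] at hz0 hz1 hzD
      obtain ⟨ho0, ho1, hoD⟩ := ih (vals.filter (fun v => btst v fuel)) m0 m1
        (by omega) hz0 hz1
      refine ⟨by rw [hstep, hE]; exact ho0,
              by rw [hstep, hE]; exact ho1, fun bit => ?_⟩
      rw [hstep, hE]
      obtain ⟨h01, h02⟩ := hoD bit
      obtain ⟨hz01, hz02⟩ := hzD bit
      rw [h01, h02, hz01, hz02]
      by_cases hb : bit = fuel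
      · subst hb
        rw [hc0', hc1', getD_set_self _ _ _ (by omega), getD_set_self _ _ _ (by omega)]
        rw [contrib0_top, contrib1_top]
        constructor <;> simp [contrib0, contrib1]
      · by_cases hlt : bit < fuel
        · rw [hc0', hc1', getD_set_ne _ _ _ _ (fun e => hb e.symm),
            getD_set_ne _ _ _ _ (fun e => hb e.symm)]
          rw [← contrib_split0 fuel bit hlt vals, ← contrib_split1 fuel bit hlt vals]
          constructor <;> ring
        · have hge : fuel + 1 ≤ bit := by omega
          have e0 : ∀ vs, contrib0 fuel bit vs = 0 := by
            intro vs; unfold contrib0; rw [if_neg (by omega)]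
          have e1 : ∀ vs, contrib1 fuel bit vs = 0 := by
            intro vs; unfold contrib1; rw [if_neg (by omega)]
          have e0' : contrib0 (fuel + 1) bit vals = 0 := by
            unfold contrib0; rw [if_neg (by omega)]
          have e1' : contrib1 (fuel + 1) bit vals = 0 := by
            unfold contrib1; rw [if_neg (by omega)]
          rw [hc0', hc1', getD_set_ne _ _ _ _ (fun e => hb e.symm),
            getD_set_ne _ _ _ _ (fun e => hb e.symm)]
          simp only [e0, e1, e0', e1']
          constructor <;> ring

-- ---- bridging B's value-level bit tests to A's char matrix ----

lemma aBitRow_getD (x : Int) (j : Nat) (hj : j < 30) :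
    (aBitRow x).getD j '0' = if PySem.Int.band x ((1:Int) <<< (29 - j)) ≠ 0 then '1' else '0' := by
  unfold aBitRow
  rw [PySem.List.foldl_append_singleton_eq_map, List.nil_append]
  rw [List.getD_eq_getElem _ _ (by simp; omega)]
  rw [List.getElem_reverse]
  simp only [List.length_map, List.length_range, List.getElem_map, List.getElem_range]

lemma self_map_getD (a : List Int) : a = (List.range a.length).map (fun k => a.getD k 0) := by
  apply List.ext_getElem (by simp)
  intro k hk _
  simp only [List.getElem_map, List.getElem_range]
  rw [List.getD_eq_getElem _ _ hk]

lemma chA_btst (a : List Int) (k j : Nat) (hk : k < a.length) (hj : j < 30) :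
    chA (a.map aBitRow) k j = btst (a.getD k 0) (29 - j) := by
  unfold chA btst
  have h1 : (a.map aBitRow).getD k [] = aBitRow (a.getD k 0) := by
    rw [List.getD_eq_getElem _ _ (by simpa using hk), List.getElem_map,
      List.getD_eq_getElem _ _ hk]
  rw [h1, aBitRow_getD _ _ hj]
  by_cases hb : PySem.Int.band (a.getD k 0) ((1:Int) <<< (29 - j)) ≠ 0 <;> simp [hb]

lemma relB_keyA (a : List Int) (bit : Nat) (hb : bit < 30) (x y : Nat)
    (hx : x < a.length) (hy : y < a.length) :
    relB (bit + 1) 30 (a.getD x 0) (a.getD y 0) = keyA (a.map aBitRow) (29 - bit) x y := by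
  unfold relB keyA
  rw [Bool.eq_iff_iff]
  simp only [List.all_eq_true, List.mem_range, List.mem_range'_1]
  constructor
  · intro h j hj
    rw [chA_btst a x j hx (by omega), chA_btst a y j hy (by omega)]
    exact h (29 - j) (by omega)
  · intro h m hm
    have := h (29 - m) (by omega)
    rw [chA_btst a x (29 - m) hx (by omega), chA_btst a y (29 - m) hy (by omega)] at this
    have hmm : 29 - (29 - m) = m := by omega
    rw [hmm] at this
    exact this

lemma contrib0_can (a : List Int) (bit : Nat) (hb : bit < 30) :
    contrib0 30 bit a = s0can (a.map aBitRow) a.length (29 - bit) := by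
  unfold contrib0 s0can
  rw [if_pos hb]
  congr 1
  conv_lhs => rw [self_map_getD a, pcR_map]
  refine pcR_congr_mem _ _ _ _ _ _ _ ?_ ?_ ?_
  · intro x hx y hy
    exact relB_keyA a bit hb x y (List.mem_range.mp hx) (List.mem_range.mp hy)
  · intro x hx
    rw [chA_btst a x (29 - bit) (List.mem_range.mp hx) (by omega)]
    have : 29 - (29 - bit) = bit := by omega
    rw [this]
  · intro x hx
    rw [chA_btst a x (29 - bit) (List.mem_range.mp hx) (by omega)]
    have : 29 - (29 - bit) = bit := by omega
    rw [this]

lemma contrib1_can (a : List Int) (bit : Nat) (hb : bit < 30) :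
    contrib1 30 bit a = s1can (a.map aBitRow) a.length (29 - bit) := by
  unfold contrib1 s1can
  rw [if_pos hb]
  congr 1
  conv_lhs => rw [self_map_getD a, pcR_map]
  refine pcR_congr_mem _ _ _ _ _ _ _ ?_ ?_ ?_
  · intro x hx y hy
    exact relB_keyA a bit hb x y (List.mem_range.mp hx) (List.mem_range.mp hy)
  · intro x hx
    rw [chA_btst a x (29 - bit) (List.mem_range.mp hx) (by omega)]
    have : 29 - (29 - bit) = bit := by omega
    rw [this]
  · intro x hx
    rw [chA_btst a x (29 - bit) (List.mem_range.mp hx) (by omega)]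
    have : 29 - (29 - bit) = bit := by omega
    rw [this]

lemma bFin (a : List Int) (cost0 cost1 : List Int)
    (h0 : ∀ i : Nat, i < 30 → cost0.getD (29 - i) 0 = s0can (a.map aBitRow) a.length i)
    (h1 : ∀ i : Nat, i < 30 → cost1.getD (29 - i) 0 = s1can (a.map aBitRow) a.length i) :
    ∀ (l : List Nat), (∀ j ∈ l, j < 30) → ∀ (ans b : Int),
      l.foldl (bFinStep cost0 cost1) (b, ans) =
        ((l.foldl (cstep (a.map aBitRow) a.length) (ans, b)).2,
         (l.foldl (cstep (a.map aBitRow) a.length) (ans, b)).1) := by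
  intro l
  induction l with
  | nil => intro _ ans b; rfl
  | cons j t ih =>
    intro hmem ans b
    rw [List.foldl_cons, List.foldl_cons]
    have hj : j < 30 := hmem j List.mem_cons_self
    rcases hc : cstep (a.map aBitRow) a.length (ans, b) j with ⟨A, B⟩
    have hstep : bFinStep cost0 cost1 (b, ans) j =
        ((cstep (a.map aBitRow) a.length (ans, b) j).2,
         (cstep (a.map aBitRow) a.length (ans, b) j).1) := by
      simp only [bFinStep, cstep, h0 j hj, h1 j hj]
      split <;> rfl
    rw [hstep, hc]
    exact ih (fun x hx => hmem x (List.mem_cons_of_mem _ hx)) A B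

-- ===== VERDICT (by name: the statement is the Claim_ definition above) =====
theorem compute_min_inversion_xor_spec : Claim_equal_compute_min_inversion_xor := by
  intro a _
  unfold Spec_compute_min_inversion_xor
  simp only [compute_min_inversion_xor, compute_min_inversion_xor_alt]
  have hA := aLoop (a.map aBitRow) a.length 30 0 [List.range a.length] 0 0
    (invA_zero (a.map aBitRow) a.length)
  rw [← List.range_eq_range'] at hA
  rcases hEq : (List.range 30).foldl (aBitStep (a.map aBitRow)) ([List.range a.length], 0, 0)
    with ⟨r, ans, b⟩
  rw [hEq] at hA
  obtain ⟨hl0, hl1, hD⟩ := bRec_spec 30 a (List.replicate 30 0) (List.replicate 30 0)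
    (le_refl 30) (by simp) (by simp)
  rcases hB : bRec 30 a (List.replicate 30 0, List.replicate 30 0) with ⟨c0, c1⟩
  rw [hB] at hD
  have hrep : ∀ bit : Nat, (List.replicate 30 (0:Int)).getD bit 0 = 0 := by
    intro bit
    simp only [List.getD, List.getElem?_replicate]
    split <;> rfl
  have h0 : ∀ i : Nat, i < 30 → c0.getD (29 - i) 0 = s0can (a.map aBitRow) a.length i := by
    intro i hi
    have := (hD (29 - i)).1
    rw [hrep, contrib0_can a (29 - i) (by omega)] at this
    have h29 : 29 - (29 - i) = i := by omega
    rw [h29, zero_add] at this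
    exact this
  have h1 : ∀ i : Nat, i < 30 → c1.getD (29 - i) 0 = s1can (a.map aBitRow) a.length i := by
    intro i hi
    have := (hD (29 - i)).2
    rw [hrep, contrib1_can a (29 - i) (by omega)] at this
    have h29 : 29 - (29 - i) = i := by omega
    rw [h29, zero_add] at this
    exact this
  have hBfin := bFin a c0 c1 h0 h1 (List.range 30) (fun j hj => List.mem_range.mp hj) 0 0
  rw [hBfin, ← hA]
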